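-- pv_equiv track=rewrite | github.com/hnanmal/mQ | H_FamilyList_FP/src/views/project_info_tab/room_treeview_utils.py | group_inputs
-- ===== SOURCE A (Python) =====
-- def group_inputs(inputs):
--     indexes = []
--     res = []
--     for row_idx, row_input in enumerate(inputs):
--         if " / " in row_input:
--             indexes.append(row_idx)
--     if indexes:
--         slice_area = [[x, y] for x, y in zip(indexes[0::1], indexes[1::1])]
--         for stt, end in slice_area:
--             grp = inputs[stt:end]
--             finish_type = grp[0].split("\t")[0]
--             room_inputs = grp[1:]
--             for room_input in room_inputs:
--                 room_no, room_name, *_ = room_input.split("\t")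
--                 room_dict = {
--                     "room_name": room_name,
--                     "room_no": room_no,
--                     "finish_type": finish_type,
--                 }
--                 res.append(room_dict)
--     else:
--         for room_input in inputs:
--             room_no, room_name, *_ = room_input.split("\t")
--             room_dict = {
--                 "room_name": room_name,
--                 "room_no": room_no,
--                 "finish_type": "",
--             }
--             res.append(room_dict)
--     return res
-- ===== SOURCE B (Python) =====
-- def group_inputs(inputs):
--     # One streaming pass: buffer rows, flush the buffer when the next
--     # finish-type delimiter row arrives; the trailing buffer is dropped
--     # (A drops the tail group too).  No-delimiter inputs are emitted
--     # wholesale with an empty finish_type, as in A's else-branch.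
--     res = []
--     finish_type = None
--     pending = []
--     for row in inputs:
--         if " / " in row:
--             if finish_type is not None:
--                 for r in pending:
--                     room_no, room_name, *_ = r.split("\t")
--                     res.append({
--                         "room_name": room_name,
--                         "room_no": room_no,
--                         "finish_type": finish_type,
--                     })
--             finish_type = row.split("\t")[0]
--             pending = []
--         else:
--             pending.append(row)
--     if finish_type is None:
--         return [
--             {
--                 "room_name": r.split("\t")[1],
--                 "room_no": r.split("\t")[0],
--                 "finish_type": "",
--             }
--             for r in inputs
--         ]
--     return res
-- ===== Notes on version B (the rewrite author's own statement) =====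
-- stated objective: simpler
-- what changed: A collects delimiter indexes, zips them into consecutive pairs and re-slices the input list per pair; B is a single streaming pass that buffers rows and flushes the buffer when the next delimiter row arrives (dropping the trailing buffer), with the no-delimiter case emitted wholesale.
import Mathlib
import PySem

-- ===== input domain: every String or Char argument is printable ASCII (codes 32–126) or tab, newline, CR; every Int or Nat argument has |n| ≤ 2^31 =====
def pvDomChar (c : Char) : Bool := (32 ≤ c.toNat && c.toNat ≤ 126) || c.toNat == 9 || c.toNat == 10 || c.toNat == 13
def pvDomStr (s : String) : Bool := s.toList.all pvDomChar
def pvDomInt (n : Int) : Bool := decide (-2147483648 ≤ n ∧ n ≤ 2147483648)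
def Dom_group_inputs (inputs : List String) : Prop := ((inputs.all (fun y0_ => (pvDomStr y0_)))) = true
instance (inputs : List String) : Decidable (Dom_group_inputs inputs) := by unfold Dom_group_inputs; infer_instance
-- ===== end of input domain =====

-- B replaces A's collect-delimiter-indexes-then-slice-pairs pass by a single streaming
-- pass with a pending-rows buffer (objective: simpler decomposition, same cost).

-- shared helpers (both Pythons contain these identical fragments)
-- " / " in row
def pvDelim (r : String) : Bool := PySem.Str.isIn " / " r
-- row.split("\t")  (the separator is nonempty, so split? is never none; getD is exact)
def pvSplit (r : String) : List String := (PySem.Str.split? r "\t").getD []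
-- row.split("\t")[0]  (a split on a nonempty separator is never the empty list, so headD is exact)
def pvFt (r : String) : String := (pvSplit r).headD ""
-- room_no, room_name, *_ = row.split("\t"); {"room_name":…, "room_no":…, "finish_type":ft}
-- Python raises ValueError when the split has fewer than 2 parts; Pre_ excludes those inputs.
def pvEntry (ft : String) (r : String) : List (String × String) :=
  match pvSplit r with
  | no :: name :: _ => [("room_name", name), ("room_no", no), ("finish_type", ft)]
  | _ => []

-- ===== PORT A =====
def group_inputs (inputs : List String) : List (List (String × String)) :=
  let indexes : List Int :=
    (PySem.List.enumerate inputs).foldl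
      (fun acc p => if pvDelim p.2 then acc ++ [p.1] else acc) []
  if indexes ≠ [] then
    let slice_area := List.zip (PySem.List.slice indexes (some 0) none)
                               (PySem.List.slice indexes (some 1) none)
    slice_area.foldl (fun res p =>
      let grp := PySem.List.slice inputs (some p.1) (some p.2)
      -- grp[0]: grp is nonempty (p.1 < p.2 are indices into inputs), so headD is exact
      let finish_type := pvFt (grp.headD "")
      let room_inputs := PySem.List.slice grp (some 1) none
      room_inputs.foldl (fun res r => res ++ [pvEntry finish_type r]) res) []
  else
    inputs.foldl (fun res r => res ++ [pvEntry "" r]) []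

-- ===== PORT B =====
def group_inputs_alt (inputs : List String) : List (List (String × String)) :=
  let st := inputs.foldl
    (fun (st : List (List (String × String)) × Option String × List String) row =>
      if pvDelim row then
        match st.2.1 with
        | some f => (st.1 ++ (st.2.2).map (pvEntry f), some (pvFt row), [])
        | none => (st.1, some (pvFt row), [])
      else (st.1, st.2.1, st.2.2 ++ [row]))
    ([], none, [])
  match st.2.1 with
  | none => inputs.map (pvEntry "")
  | some _ => st.1

-- ===== PRECONDITION & SPEC =====
-- Pre_ excludes exactly the inputs where Python A raises ValueError: a tab-less row
-- that A actually parses, i.e. a non-delimiter row lying between two delimiter rows,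
-- or any tab-less row at all when no delimiter row exists.
def Pre_group_inputs (inputs : List String) : Prop :=
  ∀ i : Nat, ∀ _ : i < inputs.length,
    PySem.Str.isIn " / " inputs[i] = false →
    ((inputs.take i).any (fun r => PySem.Str.isIn " / " r) = true ∧
       (inputs.drop (i+1)).any (fun r => PySem.Str.isIn " / " r) = true
     ∨ inputs.any (fun r => PySem.Str.isIn " / " r) = false) →
    PySem.Str.isIn "\t" inputs[i] = true
instance (inputs : List String) : Decidable (Pre_group_inputs inputs) := by
  unfold Pre_group_inputs; infer_instance

def pvWitness_group_inputs : List String :=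
  ["FT1 / mortar\tx", "101\tLobby", "102\tHall\textra", "FT2 / tile"]

def Spec_group_inputs (inputs : List String) (out : List (List (String × String))) : Prop :=
  out = group_inputs_alt inputs
instance (inputs : List String) (out : List (List (String × String))) :
    Decidable (Spec_group_inputs inputs out) := by unfold Spec_group_inputs; infer_instance

-- ===== CLAIM (what is proved, stated in full; the proofs are below) =====
def Claim_equal_group_inputs : Prop :=
  ∀ (inputs : List String), Dom_group_inputs inputs → Pre_group_inputs inputs →
    Spec_group_inputs inputs (group_inputs inputs)

-- ===== LEMMAS AND PROOFS =====

-- positions of the delimiter rows (proof-side helper)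
def nIdx : List String → List Nat
  | [] => []
  | r :: t => if pvDelim r then 0 :: (nIdx t).map (· + 1) else (nIdx t).map (· + 1)

-- the rooms contributed by one slice pair, with Nat indices
def pvGrp (l : List String) (p : Nat × Nat) : List (List (String × String)) :=
  ((l.drop p.1).take (p.2 - p.1)).tail.map
    (pvEntry (pvFt (((l.drop p.1).take (p.2 - p.1)).headD "")))

-- A's delimiter-branch result, index-free form
def Aflat (l : List String) : List (List (String × String)) :=
  ((nIdx l).zip (nIdx l).tail).flatMap (pvGrp l)

-- B's emitted entries once a finish type f is current (pending buffer empty)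
def gSpec : List String → String → List (List (String × String))
  | [], _ => []
  | r :: t, f =>
    if pvDelim r then gSpec t (pvFt r)
    else if t.any pvDelim then pvEntry f r :: gSpec t f else []

-- the common specification of both programs
def gSkip : List String → List (List (String × String))
  | [] => []
  | r :: t => if pvDelim r then gSpec t (pvFt r) else gSkip t

theorem nIdx_eq_nil_iff (l : List String) : nIdx l = [] ↔ l.any pvDelim = false := by
  induction l with
  | nil => simp [nIdx]
  | cons r t ih => by_cases h : pvDelim r <;> simp [nIdx, h, ih]

theorem gSpec_of_no_delim (l : List String) (f : String) (h : l.any pvDelim = false) :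
    gSpec l f = [] := by
  induction l generalizing f with
  | nil => rfl
  | cons r t ih =>
    simp only [List.any_cons, Bool.or_eq_false_iff] at h
    simp [gSpec, h.1, h.2,]

theorem pvGrp_shift (r : String) (t : List String) (i j : Nat) :
    pvGrp (r :: t) (i + 1, j + 1) = pvGrp t (i, j) := by
  simp [pvGrp, Nat.add_sub_add_right]

theorem flatMap_shift (r : String) (t : List String) :
    ((((nIdx t).map (· + 1)).zip ((nIdx t).map (· + 1)).tail).flatMap (pvGrp (r :: t)))
      = Aflat t := by
  rw [← List.map_tail, List.zip_map, List.flatMap_map]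
  refine congrArg (fun g => List.flatMap g ((nIdx t).zip (nIdx t).tail)) ?_
  funext p
  exact pvGrp_shift r t p.1 p.2

theorem Aflat_cons_not_delim (r : String) (t : List String) (h : pvDelim r = false) :
    Aflat (r :: t) = Aflat t := by
  have hn : nIdx (r :: t) = (nIdx t).map (· + 1) := by simp [nIdx, h]
  rw [Aflat, hn, flatMap_shift]

theorem Aflat_cons_delim (r : String) (t : List String) (h : pvDelim r = true) :
    Aflat (r :: t) =
      (match nIdx t with
       | [] => []
       | j :: _ => (t.take j).map (pvEntry (pvFt r)) ++ Aflat t) := by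
  have hn : nIdx (r :: t) = 0 :: (nIdx t).map (· + 1) := by simp [nIdx, h]
  cases hm : nIdx t with
  | nil => simp [Aflat, hn, hm]
  | cons j t2 =>
    have hz : (nIdx (r :: t)).zip (nIdx (r :: t)).tail
        = (0, j + 1) :: (((nIdx t).map (· + 1)).zip ((nIdx t).map (· + 1)).tail) := by
      rw [hn, hm]; rfl
    rw [Aflat, hz, List.flatMap_cons, flatMap_shift]
    simp [pvGrp, List.take_succ_cons]

theorem A2_eq_gSpec (t : List String) (f : String) :
    (match nIdx t with
     | [] => []
     | j :: _ => (t.take j).map (pvEntry f) ++ Aflat t) = gSpec t f := by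
  induction t generalizing f with
  | nil => simp [nIdx, gSpec]
  | cons s t' ih =>
    by_cases hs : pvDelim s
    · have hn : nIdx (s :: t') = 0 :: (nIdx t').map (· + 1) := by simp [nIdx, hs]
      rw [hn]
      simp only [List.take_zero, List.map_nil, List.nil_append]
      rw [Aflat_cons_delim s t' hs, ih (pvFt s)]
      simp [gSpec, hs]
    · have hs' : pvDelim s = false := by simpa using hs
      have hn : nIdx (s :: t') = (nIdx t').map (· + 1) := by simp [nIdx, hs']
      cases hm : nIdx t' with
      | nil =>
        have hany : t'.any pvDelim = false := (nIdx_eq_nil_iff t').mp hm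
        rw [hn, hm]
        simp [gSpec, hs', hany]
      | cons j t2 =>
        have hany : t'.any pvDelim = true := by
          by_contra hc
          simp only [Bool.not_eq_true] at hc
          rw [(nIdx_eq_nil_iff t').mpr hc] at hm
          simp at hm
        rw [hn, hm]
        simp only [List.map_cons]
        rw [List.take_succ_cons, List.map_cons, Aflat_cons_not_delim s t' hs']
        have := ih f
        rw [hm] at this
        simp only [gSpec, hs', Bool.false_eq_true, if_false, hany, if_true, ← this]
        simp

theorem Aflat_eq_gSkip (l : List String) : Aflat l = gSkip l := by
  induction l with
  | nil => rfl
  | cons r t ih =>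
    by_cases h : pvDelim r
    · rw [Aflat_cons_delim r t h, A2_eq_gSpec t (pvFt r)]; simp [gSkip, h]
    · rw [Aflat_cons_not_delim r t (by simpa using h), ih]
      simp [gSkip, (by simpa using h : pvDelim r = false)]

-- ===== the A side =====

theorem idx_fold (l : List String) (s : Int) (acc : List Int) :
    (PySem.List.enumerate l s).foldl
      (fun acc p => if pvDelim p.2 then acc ++ [p.1] else acc) acc
    = acc ++ (nIdx l).map (fun n : Nat => s + (n : Int)) := by
  induction l generalizing s acc with
  | nil => simp [PySem.List.enumerate_nil, nIdx]
  | cons r t ih =>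
    rw [PySem.List.enumerate_cons, List.foldl_cons]
    by_cases h : pvDelim r
    · simp only [h, if_true, ih, nIdx, List.map_cons, List.map_map, Nat.cast_zero, add_zero,
        List.append_assoc, List.singleton_append]
      congr 2
      refine List.map_congr_left fun n _ => ?_
      simp [Function.comp]
      ring
    · simp only [h, Bool.false_eq_true, if_false, ih, nIdx, List.map_map]
      congr 1
      refine List.map_congr_left fun n _ => ?_
      simp [Function.comp]
      ring

theorem group_inputs_char (inputs : List String) :
    group_inputs inputs =
      if inputs.any pvDelim then Aflat inputs else inputs.map (pvEntry "") := by
  unfold group_inputs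
  rw [idx_fold inputs 0 []]
  have hcast : (nIdx inputs).map (fun n : Nat => (0 : Int) + (n : Int))
      = (nIdx inputs).map (fun n : Nat => (n : Int)) := by
    refine List.map_congr_left fun n _ => ?_; ring
  simp only [List.nil_append, hcast]
  by_cases h : inputs.any pvDelim
  · have hne : nIdx inputs ≠ [] := by
      intro hc; rw [(nIdx_eq_nil_iff inputs).mp hc] at h; exact Bool.noConfusion h
    have hne' : (nIdx inputs).map (fun n : Nat => (n : Int)) ≠ [] := by
      simpa using hne
    rw [if_pos hne', if_pos h]
    rw [PySem.List.slice_zero_start, PySem.List.slice_none_none, PySem.List.slice_from_one]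
    have hstep : (fun (res : List (List (String × String))) (p : Int × Int) =>
        (PySem.List.slice (PySem.List.slice inputs (some p.1) (some p.2)) (some 1) none).foldl
          (fun res r =>
            res ++ [pvEntry (pvFt ((PySem.List.slice inputs (some p.1) (some p.2)).headD "")) r])
          res)
        = (fun res p => res ++
            (PySem.List.slice (PySem.List.slice inputs (some p.1) (some p.2)) (some 1) none).map
              (pvEntry (pvFt ((PySem.List.slice inputs (some p.1) (some p.2)).headD "")))) := by
      funext res p
      exact PySem.List.foldl_append_singleton_eq_map _ _ _
    simp only [hstep]
    rw [PySem.List.foldl_append_eq_flatMap, List.nil_append]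
    rw [← List.map_tail, List.zip_map, List.flatMap_map, Aflat]
    refine List.flatMap_congr ?_
    intro p _
    simp [pvGrp, PySem.List.slice_natCast, PySem.List.slice_from_one]
  · have hnil : nIdx inputs = [] := (nIdx_eq_nil_iff inputs).mpr (by simpa using h)
    rw [hnil]
    simp only [List.map_nil, ne_eq, not_true_eq_false, if_false, if_neg h]
    rw [PySem.List.foldl_append_singleton_eq_map, List.nil_append]

-- ===== the B side =====

theorem b_fold_some (l : List String) (res : List (List (String × String)))
    (f : String) (buf : List String) :
    (l.foldl
      (fun (st : List (List (String × String)) × Option String × List String) row =>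
        if pvDelim row then
          match st.2.1 with
          | some f => (st.1 ++ (st.2.2).map (pvEntry f), some (pvFt row), [])
          | none => (st.1, some (pvFt row), [])
        else (st.1, st.2.1, st.2.2 ++ [row]))
      (res, some f, buf)).1
    = res ++ (if l.any pvDelim then buf.map (pvEntry f) ++ gSpec l f else []) ∧
    ((l.foldl
      (fun (st : List (List (String × String)) × Option String × List String) row =>
        if pvDelim row then
          match st.2.1 with
          | some f => (st.1 ++ (st.2.2).map (pvEntry f), some (pvFt row), [])
          | none => (st.1, some (pvFt row), [])
        else (st.1, st.2.1, st.2.2 ++ [row]))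
      (res, some f, buf)).2.1).isSome := by
  induction l generalizing res f buf with
  | nil => simp
  | cons r t ih =>
    by_cases h : pvDelim r
    · simp only [List.foldl_cons, h, if_true]
      obtain ⟨ih1, ih2⟩ := ih (res ++ buf.map (pvEntry f)) (pvFt r) []
      refine ⟨?_, ih2⟩
      rw [ih1]
      simp only [List.any_cons, h, Bool.true_or, if_true, List.map_nil, List.nil_append]
      cases ht : t.any pvDelim
      · simp [gSpec, h, gSpec_of_no_delim t (pvFt r) ht]
      · simp [gSpec, h]
    · have h' : pvDelim r = false := by simpa using h
      simp only [List.foldl_cons, h', Bool.false_eq_true, if_false]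
      obtain ⟨ih1, ih2⟩ := ih res f (buf ++ [r])
      refine ⟨?_, ih2⟩
      rw [ih1]
      simp only [List.any_cons, h', Bool.false_or]
      cases ht : t.any pvDelim
      · simp
      · simp [gSpec, h', ht]

theorem b_fold_none (l : List String) (res : List (List (String × String)))
    (buf : List String) :
    (l.any pvDelim = false →
      l.foldl
        (fun (st : List (List (String × String)) × Option String × List String) row =>
          if pvDelim row then
            match st.2.1 with
            | some f => (st.1 ++ (st.2.2).map (pvEntry f), some (pvFt row), [])
            | none => (st.1, some (pvFt row), [])
          else (st.1, st.2.1, st.2.2 ++ [row]))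
        (res, none, buf) = (res, none, buf ++ l)) ∧
    (l.any pvDelim = true →
      (l.foldl
        (fun (st : List (List (String × String)) × Option String × List String) row =>
          if pvDelim row then
            match st.2.1 with
            | some f => (st.1 ++ (st.2.2).map (pvEntry f), some (pvFt row), [])
            | none => (st.1, some (pvFt row), [])
          else (st.1, st.2.1, st.2.2 ++ [row]))
        (res, none, buf)).1 = res ++ gSkip l ∧
      ((l.foldl
        (fun (st : List (List (String × String)) × Option String × List String) row =>
          if pvDelim row then
            match st.2.1 with
            | some f => (st.1 ++ (st.2.2).map (pvEntry f), some (pvFt row), [])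
            | none => (st.1, some (pvFt row), [])
          else (st.1, st.2.1, st.2.2 ++ [row]))
        (res, none, buf)).2.1).isSome) := by
  induction l generalizing res buf with
  | nil => simp
  | cons r t ih =>
    by_cases h : pvDelim r
    · have h2 := b_fold_some t (res) (pvFt r) []
      constructor
      · intro hc; simp [h] at hc
      · intro _
        simp only [List.foldl_cons, h, if_true]
        obtain ⟨h21, h22⟩ := h2
        refine ⟨?_, h22⟩
        rw [h21]
        simp only [List.map_nil, List.nil_append, gSkip, h, if_true]
        cases ht : t.any pvDelim
        · simp [gSpec_of_no_delim t (pvFt r) ht]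
        · simp
    · have h' : pvDelim r = false := by simpa using h
      obtain ⟨ih1, ih2⟩ := ih res (buf ++ [r])
      constructor
      · intro hany
        simp only [List.any_cons, h', Bool.false_or] at hany
        simp only [List.foldl_cons, h', Bool.false_eq_true, if_false]
        rw [ih1 hany]
        simp
      · intro hany
        simp only [List.any_cons, h', Bool.false_or] at hany
        simp only [List.foldl_cons, h', Bool.false_eq_true, if_false]
        obtain ⟨h21, h22⟩ := ih2 hany
        refine ⟨?_, h22⟩
        rw [h21]
        simp [gSkip, h']

theorem group_inputs_alt_char (inputs : List String) :
    group_inputs_alt inputs =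
      if inputs.any pvDelim then gSkip inputs else inputs.map (pvEntry "") := by
  unfold group_inputs_alt
  by_cases h : inputs.any pvDelim
  · obtain ⟨h1, h2⟩ := (b_fold_none inputs [] []).2 h
    rw [if_pos h]
    rw [Option.isSome_iff_exists] at h2
    obtain ⟨f', hf'⟩ := h2
    simp only [hf']
    exact h1
  · have h' : inputs.any pvDelim = false := by simpa using h
    rw [(b_fold_none inputs [] []).1 h', if_neg h]

-- ===== VERDICT (by name: the statement is the Claim_ definition above) =====
theorem group_inputs_spec : Claim_equal_group_inputs := by
  intro inputs _ _
  unfold Spec_group_inputs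
  rw [group_inputs_char, group_inputs_alt_char]
  by_cases h : inputs.any pvDelim <;> simp [h, Aflat_eq_gSkip]
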